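-- pv_equiv track=rewrite | github.com/aeliskothiya/VirtualTryon | Backend/FashionAI/training/compatibility_engine.py | topwear_style_signature
-- ===== SOURCE A (Python) =====
-- def item_tokens(item_name: str) -> set[str]:
--     return {tok.upper() for tok in item_name.replace(".", "_").split("_") if tok}
--
-- def topwear_style_signature(item_name: str) -> str:
--     tokens = item_tokens(item_name)
--     priority = [
--         "BLAZER",
--         "JACKET",
--         "SHIRT",
--         "BLOUSE",
--         "TEE",
--         "TSHIRT",
--         "TOP",
--         "KNIT",
--         "SWEATER",
--         "SATIN",
--         "LACE",
--         "RUFFLE",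
--         "GRAPHIC",
--     ]
--     for t in priority:
--         if t in tokens:
--             return t
--     return "PLAIN"
-- ===== SOURCE B (Python) =====
-- RANK = {
--     "BLAZER": 0, "JACKET": 1, "SHIRT": 2, "BLOUSE": 3, "TEE": 4,
--     "TSHIRT": 5, "TOP": 6, "KNIT": 7, "SWEATER": 8, "SATIN": 9,
--     "LACE": 10, "RUFFLE": 11, "GRAPHIC": 12,
-- }
--
-- def topwear_style_signature(item_name: str) -> str:
--     best = None
--     for tok in item_name.replace(".", "_").split("_"):
--         if not tok:
--             continue
--         u = tok.upper()
--         r = RANK.get(u)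
--         if r is not None and (best is None or r < best[0]):
--             best = (r, u)
--     return best[1] if best is not None else "PLAIN"
-- ===== Notes on version B (the rewrite author's own statement) =====
-- stated objective: alternative
-- what changed: Replaces A's scan over the priority list with membership tests against the token set by a precomputed keyword-to-index rank table and a single min-rank/argmin pass over the tokens.
import Mathlib
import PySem

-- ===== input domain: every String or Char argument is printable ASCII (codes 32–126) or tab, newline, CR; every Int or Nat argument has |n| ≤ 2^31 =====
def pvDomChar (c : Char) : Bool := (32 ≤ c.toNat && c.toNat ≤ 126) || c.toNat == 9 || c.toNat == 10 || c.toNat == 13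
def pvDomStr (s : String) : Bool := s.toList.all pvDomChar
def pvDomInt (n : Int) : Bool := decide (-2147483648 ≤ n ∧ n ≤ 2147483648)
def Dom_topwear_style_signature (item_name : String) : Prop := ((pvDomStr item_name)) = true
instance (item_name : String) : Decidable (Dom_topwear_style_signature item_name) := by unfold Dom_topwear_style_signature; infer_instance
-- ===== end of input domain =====

-- B replaces A's scan over the priority list (first keyword found in the token set wins)
-- by a rank table and a single min-rank pass over the tokens; objective: alternative decomposition.

-- ===== PORT A =====
-- helper item_tokens: {tok.upper() for tok in item_name.replace(".","_").split("_") if tok}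
def pvItemTokens (item_name : String) : PySem.Set String :=
  -- split? with the literal separator "_" is always `some` (sep ≠ "")
  PySem.Set.ofList
    ((((PySem.Str.split? (PySem.Str.replace item_name "." "_") "_").getD []).filter
        (fun tok => tok ≠ "")).map PySem.Str.upper)

def pvPriority : List String :=
  ["BLAZER", "JACKET", "SHIRT", "BLOUSE", "TEE", "TSHIRT", "TOP",
   "KNIT", "SWEATER", "SATIN", "LACE", "RUFFLE", "GRAPHIC"]

-- the 'for t in priority: if t in tokens: return t' loop
def pvLoopA : List String → PySem.Set String → String
  | [], _ => "PLAIN"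
  | t :: ts, tokens => if PySem.Set.contains tokens t then t else pvLoopA ts tokens

def topwear_style_signature (item_name : String) : String :=
  pvLoopA pvPriority (pvItemTokens item_name)

-- ===== PORT B =====
-- RANK = {"BLAZER": 0, ..., "GRAPHIC": 12}
def pvRank : PySem.Dict String Int :=
  PySem.Dict.ofList
    [("BLAZER", 0), ("JACKET", 1), ("SHIRT", 2), ("BLOUSE", 3), ("TEE", 4),
     ("TSHIRT", 5), ("TOP", 6), ("KNIT", 7), ("SWEATER", 8), ("SATIN", 9),
     ("LACE", 10), ("RUFFLE", 11), ("GRAPHIC", 12)]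

-- the body of B's loop: if not tok: continue; u = tok.upper(); r = RANK.get(u);
-- if r is not None and (best is None or r < best[0]): best = (r, u)
def pvStepB (best : Option (Int × String)) (tok : String) : Option (Int × String) :=
  if tok ≠ "" then
    let u := PySem.Str.upper tok
    match PySem.Dict.get? pvRank u with
    | none => best
    | some r =>
      match best with
      | none => some (r, u)
      | some b => if r < b.1 then some (r, u) else best
  else best

def topwear_style_signature_alt (item_name : String) : String :=
  -- split? with the literal separator "_" is always `some` (sep ≠ "")
  match ((PySem.Str.split? (PySem.Str.replace item_name "." "_") "_").getD []).foldl pvStepB none with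
  | some b => b.2
  | none => "PLAIN"

-- ===== PRECONDITION & SPEC =====
def Spec_topwear_style_signature (item_name : String) (out : String) : Prop := out = topwear_style_signature_alt item_name
instance (item_name : String) (out : String) : Decidable (Spec_topwear_style_signature item_name out) := by unfold Spec_topwear_style_signature; infer_instance

-- ===== CLAIM (what is proved, stated in full; the proofs are below) =====
def Claim_equal_topwear_style_signature : Prop := ∀ (item_name : String), Dom_topwear_style_signature item_name → Spec_topwear_style_signature item_name (topwear_style_signature item_name)

-- ===== LEMMAS AND PROOFS =====

-- B's step once the empty-token skip and upper() are factored out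
def pvStepCore (best : Option (Int × String)) (tok : String) : Option (Int × String) :=
  match PySem.Dict.get? pvRank tok with
  | none => best
  | some r =>
    match best with
    | none => some (r, tok)
    | some b => if r < b.1 then some (r, tok) else best

-- B's fold over the raw tokens = the core fold over the kept, uppercased tokens
theorem pvFoldB_eq (xs : List String) :
    ∀ acc, xs.foldl pvStepB acc =
      ((xs.filter (fun t => t ≠ "")).map PySem.Str.upper).foldl pvStepCore acc := by
  induction xs with
  | nil => intro acc; rfl
  | cons tok ts ih =>
    intro acc
    by_cases h : tok = ""
    · subst h
      simp only [List.foldl, List.filter]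
      rw [ih]
      rfl
    · have hstep : pvStepB acc tok = pvStepCore acc (PySem.Str.upper tok) := by
        simp [pvStepB, pvStepCore, h]
      simp only [List.foldl, List.filter, decide_not, h, decide_false, Bool.not_false,
        List.map, hstep, ih]

-- A's loop is find? over the priority list
theorem pvLoopA_eq_find? (l : List String) (tokens : PySem.Set String) :
    pvLoopA l tokens =
      match l.find? (fun t => PySem.Set.contains tokens t) with
      | some t => t
      | none => "PLAIN" := by
  induction l with
  | nil => rfl
  | cons t ts ih =>
    rw [List.find?]
    cases h : PySem.Set.contains tokens t with
    | true => simp only [pvLoopA, h, if_true]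
    | false => simp only [pvLoopA, h, Bool.false_eq_true, if_false, ih]

theorem pvRank_items : pvRank.items =
    [("BLAZER", (0:Int)), ("JACKET", 1), ("SHIRT", 2), ("BLOUSE", 3), ("TEE", 4),
     ("TSHIRT", 5), ("TOP", 6), ("KNIT", 7), ("SWEATER", 8), ("SATIN", 9),
     ("LACE", 10), ("RUFFLE", 11), ("GRAPHIC", 12)] := by decide

-- from a successful lookup: the rank is a valid index and priority[rank] is the key
theorem pvRank_sound (t : String) (r : Int) (h : PySem.Dict.get? pvRank t = some r) :
    0 ≤ r ∧ r < 13 ∧ pvPriority[r.toNat]? = some t := by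
  have hm := PySem.Dict.mem_items_of_get?_eq_some pvRank h
  rw [pvRank_items] at hm
  simp only [List.mem_cons, List.not_mem_nil, or_false, Prod.mk.injEq] at hm
  rcases hm with ⟨ht, hr⟩|⟨ht, hr⟩|⟨ht, hr⟩|⟨ht, hr⟩|⟨ht, hr⟩|⟨ht, hr⟩|⟨ht, hr⟩|⟨ht, hr⟩|⟨ht, hr⟩|⟨ht, hr⟩|⟨ht, hr⟩|⟨ht, hr⟩|⟨ht, hr⟩ <;>
    subst ht <;> subst hr <;> refine ⟨by decide, by decide, by decide⟩

-- every priority entry has its index as rank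
theorem pvRank_complete (i : Nat) (t : String) (h : pvPriority[i]? = some t) :
    PySem.Dict.get? pvRank t = some (i : Int) := by
  have hi : i < 13 := by
    by_contra hge
    rw [List.getElem?_eq_none (by simp [pvPriority]; omega)] at h
    simp at h
  interval_cases i <;> simp [pvPriority] at h <;> subst h <;> decide

-- every priority keyword is ranked
theorem pvRank_of_mem (t : String) (h : t ∈ pvPriority) : ∃ r, PySem.Dict.get? pvRank t = some r := by
  obtain ⟨i, hi⟩ := List.mem_iff_getElem?.mp h
  exact ⟨(i : Int), pvRank_complete i t hi⟩

-- invariant of B's fold: the accumulator holds a ranked member of the seen tokens of minimal rank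
def pvGood (acc : Option (Int × String)) (seen : List String) : Prop :=
  match acc with
  | none => ∀ t ∈ seen, PySem.Dict.get? pvRank t = none
  | some (r, k) => k ∈ seen ∧ PySem.Dict.get? pvRank k = some r ∧
      ∀ t ∈ seen, ∀ s, PySem.Dict.get? pvRank t = some s → r ≤ s

theorem pvStepCore_good (acc : Option (Int × String)) (seen : List String) (t : String)
    (h : pvGood acc seen) : pvGood (pvStepCore acc t) (seen ++ [t]) := by
  unfold pvStepCore
  cases hr : PySem.Dict.get? pvRank t with
  | none =>
    cases acc with
    | none =>
      intro x hx
      rcases List.mem_append.mp hx with hx | hx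
      · exact h x hx
      · simp at hx; subst hx; exact hr
    | some b =>
      obtain ⟨hk, hrk, hmin⟩ := h
      refine ⟨List.mem_append.mpr (Or.inl hk), hrk, ?_⟩
      intro x hx s hs
      rcases List.mem_append.mp hx with hx | hx
      · exact hmin x hx s hs
      · simp at hx; subst hx; rw [hr] at hs; simp at hs
  | some r =>
    cases acc with
    | none =>
      refine ⟨List.mem_append.mpr (Or.inr (by simp)), hr, ?_⟩
      intro x hx s hs
      rcases List.mem_append.mp hx with hx | hx
      · rw [h x hx] at hs; simp at hs
      · simp at hx; subst hx; rw [hr] at hs; exact le_of_eq (Option.some.inj hs)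
    | some b =>
      obtain ⟨hk, hrk, hmin⟩ := h
      dsimp only
      by_cases hlt : r < b.1
      · rw [if_pos hlt]
        refine ⟨List.mem_append.mpr (Or.inr (by simp)), hr, ?_⟩
        intro x hx s hs
        rcases List.mem_append.mp hx with hx | hx
        · exact le_of_lt (lt_of_lt_of_le hlt (hmin x hx s hs))
        · simp at hx; subst hx; rw [hr] at hs
          exact le_of_eq (Option.some.inj hs)
      · rw [if_neg hlt]
        refine ⟨List.mem_append.mpr (Or.inl hk), hrk, ?_⟩
        intro x hx s hs
        rcases List.mem_append.mp hx with hx | hx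
        · exact hmin x hx s hs
        · simp at hx; subst hx; rw [hr] at hs
          rw [← Option.some.inj hs]; omega

theorem pvFold_good (toks : List String) :
    ∀ (acc : Option (Int × String)) (seen : List String), pvGood acc seen →
      pvGood (toks.foldl pvStepCore acc) (seen ++ toks) := by
  induction toks with
  | nil => intro acc seen h; simpa using h
  | cons t ts ih =>
    intro acc seen h
    have h1 := pvStepCore_good acc seen t h
    have h2 := ih (pvStepCore acc t) (seen ++ [t]) h1
    simpa [List.append_assoc] using h2

-- find? returns the element at the least index satisfying the predicate
theorem pvFind?_of_least {α : Type} (pred : α → Bool) (l : List α) (n : Nat) (x : α)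
    (hx : l[n]? = some x) (hpx : pred x = true)
    (hlt : ∀ i, i < n → ∀ y, l[i]? = some y → pred y = false) :
    l.find? pred = some x := by
  induction l generalizing n with
  | nil => simp at hx
  | cons a l ih =>
    cases n with
    | zero =>
      simp at hx; subst hx
      simp [List.find?, hpx]
    | succ m =>
      have ha : pred a = false := hlt 0 (Nat.succ_pos m) a (by simp)
      simp only [List.getElem?_cons_succ] at hx
      simp only [List.find?, ha]
      exact ih m hx (fun i hi y hy => hlt (i + 1) (by omega) y (by simpa using hy))

-- core: A's scan over the priority list and B's min-rank fold agree on any token list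
theorem pvCore (toks : List String) :
    pvLoopA pvPriority (PySem.Set.ofList toks) =
      (match toks.foldl pvStepCore none with
       | some b => b.2
       | none => "PLAIN") := by
  have hgood : pvGood (toks.foldl pvStepCore none) toks := by
    have := pvFold_good toks none [] (by intro t ht; simp at ht)
    simpa using this
  rw [pvLoopA_eq_find?]
  cases hf : toks.foldl pvStepCore none with
  | none =>
    rw [hf] at hgood
    have : pvPriority.find? (fun t => PySem.Set.contains (PySem.Set.ofList toks) t) = none := by
      rw [List.find?_eq_none]
      intro t ht
      simp only [PySem.Set.contains_iff, PySem.Set.mem_ofList]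
      intro hmem
      obtain ⟨r, hr⟩ := pvRank_of_mem t ht
      rw [hgood t hmem] at hr
      simp at hr
    rw [this]
  | some b =>
    obtain ⟨r, k⟩ := b
    rw [hf] at hgood
    obtain ⟨hk, hrk, hmin⟩ := hgood
    obtain ⟨hr0, hr13, hget⟩ := pvRank_sound k r hrk
    have : pvPriority.find? (fun t => PySem.Set.contains (PySem.Set.ofList toks) t) = some k := by
      apply pvFind?_of_least _ _ r.toNat k hget
      · exact (PySem.Set.contains_iff _ k).mpr ((PySem.Set.mem_ofList _ _).mpr hk)
      · intro i hi y hy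
        by_contra hc
        rw [Bool.not_eq_false, PySem.Set.contains_iff, PySem.Set.mem_ofList] at hc
        have := hmin y hc (i : Int) (pvRank_complete i y hy)
        omega
    rw [this]

-- ===== VERDICT (by name: the statement is the Claim_ definition above) =====
theorem topwear_style_signature_spec : Claim_equal_topwear_style_signature := by
  intro item_name _
  show topwear_style_signature item_name = topwear_style_signature_alt item_name
  rw [topwear_style_signature, topwear_style_signature_alt, pvItemTokens]
  have h := pvCore ((((PySem.Str.split? (PySem.Str.replace item_name "." "_") "_").getD []).filter
      (fun tok => tok ≠ "")).map PySem.Str.upper)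
  rw [← pvFoldB_eq] at h
  exact h
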